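-- pv_equiv track=rewrite | github.com/Dipanshi/DSA-Python | 6. Bit Manipulation/3. Common Bit Manipulation Algorithms/4. Find Single Number (All Others Appear Thrice).py | single_number_thrice
-- ===== SOURCE A (Python) =====
-- def single_number_thrice(arr):
--     """
--     Find number that appears once
--     All others appear three times
--     """
--     ones = twos = 0
--
--     for num in arr:
--         # Update twos with bits that appeared twice
--         twos |= ones & num
--
--         # Update ones with current number
--         ones ^= num
--
--         # Remove bits that appeared three times
--         threes = ones & twos
--         ones &= ~threes
--         twos &= ~threes
--
--     return ones
-- ===== SOURCE B (Python) =====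
-- def single_number_thrice(arr):
--     """
--     Find number that appears once
--     All others appear three times
--     """
--     # Bit-counting reconstruction: for each bit position, count how many
--     # elements have that bit set; keep the bit iff the count mod 3 is 1.
--     # High bits (>= L) of every element are just its sign bit, so they are
--     # handled once via the count of negative elements.
--     L = 0
--     neg = 0
--     for n in arr:
--         L = max(L, n.bit_length())
--         if n < 0:
--             neg += 1
--     res = 0
--     for i in range(L):
--         c = 0
--         for n in arr:
--             c += (n >> i) & 1
--         if c % 3 == 1:
--             res |= 1 << i
--     if neg % 3 == 1:
--         res -= 1 << L
--     return res
-- ===== Notes on version B (the rewrite author's own statement) =====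
-- stated objective: alternative
-- what changed: Replaces A's ones/twos bitwise finite-state machine over the whole list with a per-bit-position algorithm: for each bit index up to the maximum bit length it counts the elements with that bit set and keeps the bit iff the count mod 3 is 1, handling all higher (sign) bits at once via the count of negative elements.
import Mathlib
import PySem

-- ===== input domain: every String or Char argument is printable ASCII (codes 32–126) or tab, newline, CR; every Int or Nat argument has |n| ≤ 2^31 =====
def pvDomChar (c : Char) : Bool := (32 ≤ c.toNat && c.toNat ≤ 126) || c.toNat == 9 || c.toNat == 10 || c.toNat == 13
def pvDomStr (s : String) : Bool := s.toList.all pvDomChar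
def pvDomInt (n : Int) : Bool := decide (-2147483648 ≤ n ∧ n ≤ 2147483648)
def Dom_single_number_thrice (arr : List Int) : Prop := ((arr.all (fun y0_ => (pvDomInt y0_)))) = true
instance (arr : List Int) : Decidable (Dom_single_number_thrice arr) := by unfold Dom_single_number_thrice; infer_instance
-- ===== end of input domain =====

-- B replaces A's ones/twos bitwise finite-state machine by per-bit-position popcounts
-- taken mod 3 (objective: alternative decomposition, same exact values, incl. negatives).

-- ===== PORT A =====
-- loop body of A's for-loop (Int.land/lor/xor/not compute Python's & | ^ ~ exactly)
def pvStepA (st : Int × Int) (num : Int) : Int × Int :=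
  let twos := Int.lor st.2 (Int.land st.1 num)
  let ones := Int.xor st.1 num
  let threes := Int.land ones twos
  (Int.land ones (Int.not threes), Int.land twos (Int.not threes))

def single_number_thrice (arr : List Int) : Int :=
  (arr.foldl pvStepA (0, 0)).1

-- ===== PORT B =====
-- counters L and neg are Python ints that are provably ≥ 0, kept as Nat (exact);
-- range(L) is List.range L; n >> i, 1 << i are core's >>>/<<< (Python-exact per PYSEM)
def single_number_thrice_alt (arr : List Int) : Int :=
  let L : Nat := arr.foldl (fun a n => max a (PySem.Int.bitLength n)) 0
  let neg : Nat := arr.foldl (fun a n => if n < 0 then a + 1 else a) 0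
  let res : Int := (List.range L).foldl
    (fun (res : Int) (i : Nat) =>
      let c : Int := arr.foldl (fun (s : Int) (n : Int) => s + Int.land (n >>> i) 1) 0
      if c % 3 = 1 then Int.lor res (1 <<< i) else res) 0
  if neg % 3 = 1 then res - (1 <<< L) else res

-- ===== PRECONDITION & SPEC =====
def Spec_single_number_thrice (arr : List Int) (out : Int) : Prop := out = single_number_thrice_alt arr
instance (arr : List Int) (out : Int) : Decidable (Spec_single_number_thrice arr out) := by unfold Spec_single_number_thrice; infer_instance

-- ===== CLAIM (what is proved, stated in full; the proofs are below) =====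
def Claim_equal_single_number_thrice : Prop := ∀ (arr : List Int), Dom_single_number_thrice arr → Spec_single_number_thrice arr (single_number_thrice arr)

-- ===== LEMMAS AND PROOFS =====

-- number of elements of arr whose bit i is set (in Python's infinite two's complement)
def pvCnt (arr : List Int) (i : Nat) : Nat := arr.countP (fun n => n.testBit i)

-- the Nat mirror of B's res-accumulator over range L
def pvN (cond : Nat → Bool) : Nat → Nat
  | 0 => 0
  | L + 1 => if cond L then pvN cond L ||| (1 <<< L) else pvN cond L

lemma pv_not_eq_lnot (n : Int) : Int.not n = Int.lnot n := by cases n <;> rfl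

lemma pv_testBit_ext (a b : Int) (h : ∀ i, a.testBit i = b.testBit i) : a = b := by
  cases a with
  | ofNat m =>
    cases b with
    | ofNat n =>
      have : m = n := Nat.eq_of_testBit_eq (fun i => h i)
      simp [this]
    | negSucc n =>
      have h2 := h (m + n + 1)
      have hm : m.testBit (m + n + 1) = false :=
        Nat.testBit_lt_two_pow (lt_of_le_of_lt (by omega) (Nat.lt_two_pow_self))
      have hn : n.testBit (m + n + 1) = false :=
        Nat.testBit_lt_two_pow (lt_of_le_of_lt (by omega) (Nat.lt_two_pow_self))
      simp [Int.testBit, hm, hn] at h2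
  | negSucc m =>
    cases b with
    | ofNat n =>
      have h2 := h (m + n + 1)
      have hm : m.testBit (m + n + 1) = false :=
        Nat.testBit_lt_two_pow (lt_of_le_of_lt (by omega) (Nat.lt_two_pow_self))
      have hn : n.testBit (m + n + 1) = false :=
        Nat.testBit_lt_two_pow (lt_of_le_of_lt (by omega) (Nat.lt_two_pow_self))
      simp [Int.testBit, hm, hn] at h2
    | negSucc n =>
      have : m = n := Nat.eq_of_testBit_eq (fun i => by
        have := h i; simpa [Int.testBit] using this)
      simp [this]

lemma pv_and_one (k : Nat) : k &&& 1 = if k.testBit 0 then 1 else 0 := by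
  rw [Nat.and_one_is_mod, Nat.testBit_zero]
  rcases Nat.mod_two_eq_zero_or_one k with h | h <;> simp [h]

lemma pv_ldiff_one (k : Nat) : Nat.ldiff 1 k = if k.testBit 0 then 0 else 1 := by
  apply Nat.eq_of_testBit_eq
  intro j
  rw [Nat.testBit_ldiff]
  have h1 : Nat.testBit 1 j = decide (0 = j) := by
    simpa using (Nat.testBit_two_pow (n := 0) (m := j))
  cases hk : k.testBit 0 <;> cases j <;> simp [h1, hk, Nat.testBit_succ]

-- (n >> i) & 1 is the indicator of bit i of n, also for negative n
lemma pv_land_shift_one (n : Int) (i : Nat) :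
    Int.land (n >>> i) 1 = if n.testBit i then 1 else 0 := by
  cases n with
  | ofNat m =>
    show Int.land (Int.ofNat (m >>> i)) 1 = _
    have : Int.land (Int.ofNat (m >>> i)) 1 = Int.ofNat ((m >>> i) &&& 1) := rfl
    rw [this, pv_and_one]
    have hb : (m >>> i).testBit 0 = m.testBit i := by
      simp [Nat.testBit_shiftRight (i := i) (j := 0) m]
    rw [hb]
    cases h : (Int.ofNat m).testBit i <;> simp [Int.testBit] at h <;> simp [h]
  | negSucc m =>
    show Int.land (Int.negSucc (m >>> i)) 1 = _
    have : Int.land (Int.negSucc (m >>> i)) 1 = Int.ofNat (Nat.ldiff 1 (m >>> i)) := rfl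
    rw [this, pv_ldiff_one]
    have hb : (m >>> i).testBit 0 = m.testBit i := by
      simp [Nat.testBit_shiftRight (i := i) (j := 0) m]
    rw [hb]
    cases h : m.testBit i <;> simp [Int.testBit, h]

-- one step of A's FSM acts per bit as a mod-3 counter
lemma pv_stepA_bit (o t num : Int) (i : Nat) (v : Nat)
    (h1 : o.testBit i = decide (v % 3 = 1)) (h2 : t.testBit i = decide (v % 3 = 2)) :
    (pvStepA (o, t) num).1.testBit i
        = decide ((v + (if num.testBit i then 1 else 0)) % 3 = 1) ∧
      (pvStepA (o, t) num).2.testBit i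
        = decide ((v + (if num.testBit i then 1 else 0)) % 3 = 2) := by
  rcases (by omega : v % 3 = 0 ∨ v % 3 = 1 ∨ v % 3 = 2) with h | h | h <;>
    cases hb : num.testBit i <;>
      constructor <;>
        simp [pvStepA, Int.testBit_land, Int.testBit_lor, Int.testBit_lxor,
          pv_not_eq_lnot, Int.testBit_lnot, h1, h2, h, hb] <;> omega

lemma pv_foldA_bit (arr : List Int) : ∀ (o t : Int) (v : Nat → Nat),
    (∀ i, o.testBit i = decide (v i % 3 = 1)) →
    (∀ i, t.testBit i = decide (v i % 3 = 2)) →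
    ∀ i, ((arr.foldl pvStepA (o, t)).1.testBit i = decide ((v i + pvCnt arr i) % 3 = 1) ∧
          (arr.foldl pvStepA (o, t)).2.testBit i = decide ((v i + pvCnt arr i) % 3 = 2)) := by
  induction arr with
  | nil => intro o t v h1 h2 i; simp [pvCnt, h1 i, h2 i]
  | cons x xs ih =>
    intro o t v h1 h2 i
    have hstep := fun j => pv_stepA_bit o t x j (v j) (h1 j) (h2 j)
    have hmain := ih (pvStepA (o, t) x).1 (pvStepA (o, t) x).2
      (fun j => v j + (if x.testBit j then 1 else 0))
      (fun j => (hstep j).1) (fun j => (hstep j).2) i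
    have hc : pvCnt (x :: xs) i = pvCnt xs i + (if x.testBit i then 1 else 0) := by
      simp [pvCnt, List.countP_cons]
    rw [List.foldl_cons]
    constructor
    · rw [hmain.1, hc]; congr 1; simp; omega
    · rw [hmain.2, hc]; congr 1; simp; omega

lemma pv_A_bit (arr : List Int) (i : Nat) :
    (single_number_thrice arr).testBit i = decide (pvCnt arr i % 3 = 1) := by
  have h := pv_foldA_bit arr 0 0 (fun _ => 0) (by intro j; simp [Int.testBit])
    (by intro j; simp [Int.testBit]) i
  simpa [single_number_thrice] using h.1

-- ----- B side -----

lemma pv_neg_count (arr : List Int) : ∀ a : Nat,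
    arr.foldl (fun a n => if n < 0 then a + 1 else a) a
      = a + arr.countP (fun n => decide (n < 0)) := by
  induction arr with
  | nil => intro a; simp
  | cons x xs ih =>
    intro a
    rw [List.foldl_cons, ih, List.countP_cons]
    by_cases h : x < 0
    · simp [h]
      omega
    · simp [h]

lemma pv_c_count (arr : List Int) (i : Nat) : ∀ s : Int,
    arr.foldl (fun (s : Int) (n : Int) => s + Int.land (n >>> i) 1) s = s + (pvCnt arr i : Int) := by
  induction arr with
  | nil => intro s; simp [pvCnt]
  | cons x xs ih =>
    intro s
    rw [List.foldl_cons, ih, pv_land_shift_one]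
    have : pvCnt (x :: xs) i = pvCnt xs i + (if x.testBit i then 1 else 0) := by
      simp [pvCnt, List.countP_cons]
    rw [this]
    cases h : x.testBit i
    · simp
    · simp
      ring

lemma pv_foldl_max_init (arr : List Int) : ∀ a : Nat,
    a ≤ arr.foldl (fun a n => max a (PySem.Int.bitLength n)) a := by
  induction arr with
  | nil => intro a; simp
  | cons x xs ih =>
    intro a
    rw [List.foldl_cons]
    exact le_trans (le_max_left _ _) (ih _)

lemma pv_foldl_max_mem (arr : List Int) : ∀ (a : Nat) (n : Int), n ∈ arr →
    PySem.Int.bitLength n ≤ arr.foldl (fun a n => max a (PySem.Int.bitLength n)) a := by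
  induction arr with
  | nil => intro a n h; simp at h
  | cons x xs ih =>
    intro a n h
    rw [List.foldl_cons]
    rcases List.mem_cons.mp h with h | h
    · subst h
      exact le_trans (le_max_right _ _) (pv_foldl_max_init xs _)
    · exact ih _ n h

-- above its bit length, every bit of n is its sign bit
lemma pv_high_bit (n : Int) (j : Nat) (h : PySem.Int.bitLength n ≤ j) :
    n.testBit j = decide (n < 0) := by
  have hlt : n.natAbs < 2 ^ j :=
    lt_of_lt_of_le (PySem.Int.lt_two_pow_bitLength n) (Nat.pow_le_pow_right (by omega) h)
  cases n with
  | ofNat m =>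
    have hb : m.testBit j = false := Nat.testBit_lt_two_pow (by simpa using hlt)
    simp [Int.testBit, hb]
  | negSucc m =>
    have hm : m < 2 ^ j := by
      have h1 : m + 1 < 2 ^ j := by simpa [Int.natAbs] using hlt
      omega
    have : m.testBit j = false := Nat.testBit_lt_two_pow hm
    simp [Int.testBit, this, Int.negSucc_lt_zero]

lemma pv_pvN_lt (cond : Nat → Bool) : ∀ L, pvN cond L < 2 ^ L := by
  intro L
  induction L with
  | zero => simp [pvN]
  | succ L ih =>
    have h1 : pvN cond L < 2 ^ (L + 1) := lt_trans ih (by simp [Nat.pow_succ])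
    have h2 : (1 <<< L : Nat) < 2 ^ (L + 1) := by
      rw [Nat.shiftLeft_eq, one_mul]
      simp [Nat.pow_succ]
    unfold pvN
    by_cases hc : cond L = true
    · rw [if_pos hc]
      exact Nat.or_lt_two_pow h1 h2
    · rw [if_neg hc]
      exact h1

lemma pv_pvN_bit (cond : Nat → Bool) : ∀ L j, (pvN cond L).testBit j = (decide (j < L) && cond j) := by
  intro L
  induction L with
  | zero => intro j; simp [pvN]
  | succ L ih =>
    intro j
    unfold pvN
    have h2 : (1 <<< L : Nat).testBit j = decide (L = j) := by
      rw [Nat.shiftLeft_eq, one_mul]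
      exact Nat.testBit_two_pow
    by_cases hc : cond L = true
    · rw [if_pos hc, Nat.testBit_or, ih j, h2]
      rcases lt_trichotomy j L with h | h | h
      · simp [h, (show j < L + 1 by omega), (show L ≠ j by omega)]
      · subst h
        simp [hc, (show j < j + 1 by omega)]
      · simp [(show ¬ j < L by omega), (show ¬ j < L + 1 by omega), (show L ≠ j by omega)]
    · have hc' : cond L = false := by simpa using hc
      rw [if_neg hc, ih j]
      rcases lt_trichotomy j L with h | h | h
      · simp [h, (show j < L + 1 by omega)]
      · subst h
        simp [hc']
      · simp [(show ¬ j < L by omega), (show ¬ j < L + 1 by omega)]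

lemma pv_res_fold (arr : List Int) (L : Nat) :
    (List.range L).foldl
      (fun (res : Int) (i : Nat) =>
        let c : Int := arr.foldl (fun (s : Int) (n : Int) => s + Int.land (n >>> i) 1) 0
        if c % 3 = 1 then Int.lor res (1 <<< i) else res) 0
    = Int.ofNat (pvN (fun i => decide (pvCnt arr i % 3 = 1)) L) := by
  induction L with
  | zero => simp [pvN]
  | succ L ih =>
    simp only [List.range_succ, List.foldl_append, List.foldl_cons, List.foldl_nil, ih]
    rw [pv_c_count arr L 0, zero_add]
    by_cases h : pvCnt arr L % 3 = 1
    · rw [if_pos (by omega : (pvCnt arr L : Int) % 3 = 1)]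
      rw [show pvN (fun i => decide (pvCnt arr i % 3 = 1)) (L + 1)
            = pvN (fun i => decide (pvCnt arr i % 3 = 1)) L ||| 1 <<< L from by simp [pvN, h]]
      rfl
    · rw [if_neg (by omega : ¬ (pvCnt arr L : Int) % 3 = 1)]
      rw [show pvN (fun i => decide (pvCnt arr i % 3 = 1)) (L + 1)
            = pvN (fun i => decide (pvCnt arr i % 3 = 1)) L from by simp [pvN, h]]

lemma pv_B_bit (arr : List Int) (j : Nat) :
    (single_number_thrice_alt arr).testBit j = decide (pvCnt arr j % 3 = 1) := by
  simp only [single_number_thrice_alt]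
  set L := arr.foldl (fun a n => max a (PySem.Int.bitLength n)) 0 with hL
  set neg := arr.foldl (fun a n => if n < 0 then a + 1 else a) 0 with hneg
  set cond := fun i => decide (pvCnt arr i % 3 = 1) with hcond
  have hres := pv_res_fold arr L
  have hNlt := pv_pvN_lt cond L
  have hNbit := pv_pvN_bit cond L
  -- every bit at position ≥ L is the sign bit, so pvCnt there is the negative count
  have hhigh : ∀ k, L ≤ k → pvCnt arr k = neg := by
    intro k hk
    rw [hneg, pv_neg_count arr 0, Nat.zero_add]
    apply List.countP_congr
    intro n hn
    have := pv_high_bit n k (le_trans (pv_foldl_max_mem arr 0 n hn) hk)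
    simp [this]
  rw [hres]
  by_cases hn3 : neg % 3 = 1
  · simp only [hn3, if_true]
    have hsub : Int.ofNat (pvN cond L) - (((1 <<< L : Nat) : Nat) : Int)
        = Int.negSucc (2 ^ L - (pvN cond L + 1)) := by
      rw [Nat.shiftLeft_eq, one_mul]
      have h0 : Int.negSucc (2 ^ L - (pvN cond L + 1))
          = -(((2 ^ L - (pvN cond L + 1) : Nat) : Int) + 1) := Int.negSucc_eq _
      rw [h0]
      have h2 : ((2 ^ L - (pvN cond L + 1) : Nat) : Int) = ((2 ^ L : Nat) : Int) - (pvN cond L : Nat) - 1 := by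
        push_cast [Nat.cast_sub (by omega : pvN cond L + 1 ≤ 2 ^ L)]
        ring
      rw [h2]
      have h3 : (Int.ofNat (pvN cond L)) = ((pvN cond L : Nat) : Int) := rfl
      rw [h3]
      push_cast
      ring
    rw [hsub]
    have hc : (2 ^ L - (pvN cond L + 1)).testBit j
        = (decide (j < L) && !(pvN cond L).testBit j) :=
      Nat.testBit_two_pow_sub_succ hNlt j
    show (!(2 ^ L - (pvN cond L + 1)).testBit j) = cond j
    rw [hc, hNbit j]
    by_cases h : j < L
    · simp [h]
    · have := hhigh j (by omega)
      simp [h, hcond, this, hn3]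
  · simp only [hn3, if_false]
    show (pvN cond L).testBit j = cond j
    rw [hNbit j]
    by_cases h : j < L
    · simp [h]
    · have := hhigh j (by omega)
      simp [h, hcond, this, hn3]

-- ===== VERDICT (by name: the statement is the Claim_ definition above) =====
theorem single_number_thrice_spec : Claim_equal_single_number_thrice := by
  intro arr _
  unfold Spec_single_number_thrice
  apply pv_testBit_ext
  intro i
  rw [pv_A_bit, pv_B_bit]
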